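-- pv_equiv track=rewrite | github.com/rafajhon/TesteSisqualis | palindrome.py | zerar_palindrome
-- ===== SOURCE A (Python) =====
-- def zerar_palindrome(palindrome):
--     palindrome = list(palindrome)
--     size_list = len(palindrome)
--     flag = int((len(palindrome) - 1) / 2)
--     while (flag >= 0) & (palindrome[flag] == '9'):
--         palindrome[flag] = '0'
--         palindrome[size_list - flag - 1] = '0'
--         flag = flag - 1
--
--     return (''.join(palindrome))
-- ===== SOURCE B (Python) =====
-- def zerar_palindrome(palindrome):
--     s = ''.join(palindrome)
--     n = len(s)
--     c = (n - 1) // 2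
--     h = s[:c + 1]
--     k = len(h) - len(h.rstrip('9'))
--     if k == 0:
--         return s
--     z = 2 * k - n % 2
--     return s[:c - k + 1] + '0' * z + s[c - k + 1 + z:]
-- ===== Notes on version B (the rewrite author's own statement) =====
-- stated objective: idiomatic
-- what changed: A mutates the list in place walking a flag from the center leftwards and mirroring each write; B measures the central '9'-run once (len minus len of rstrip('9') of the left half) and rebuilds the string from two slices and a block of '0's, handling odd/even length by the block size.
-- outside the precondition, e.g. on zerar_palindrome(''): A raises IndexError, B returns ''
import Mathlib
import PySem

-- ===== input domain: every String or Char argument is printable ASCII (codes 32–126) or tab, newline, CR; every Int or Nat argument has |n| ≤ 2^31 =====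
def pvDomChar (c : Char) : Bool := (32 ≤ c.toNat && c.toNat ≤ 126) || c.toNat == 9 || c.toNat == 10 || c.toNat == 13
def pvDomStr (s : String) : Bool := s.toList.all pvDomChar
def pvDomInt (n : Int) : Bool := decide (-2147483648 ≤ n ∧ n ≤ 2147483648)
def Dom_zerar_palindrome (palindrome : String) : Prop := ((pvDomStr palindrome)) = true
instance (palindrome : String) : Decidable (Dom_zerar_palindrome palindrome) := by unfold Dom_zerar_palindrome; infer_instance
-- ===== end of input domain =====

-- B replaces A's index-mutating center-outward while loop by measuring the central '9'-run
-- and rebuilding the string from slices and a block of '0's (objective: idiomatic/alternative).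

-- ===== PORT A =====
-- the while loop: state = (list, flag); fuel = flag+1 bounds the iterations exactly
-- (the loop stops at flag = -1 at the latest, where `flag >= 0` is false)
def pvLoopA (size : Nat) (xs : List Char) (flag : Int) : Nat → List Char
  | 0 => xs
  | Nat.succ fuel =>
    if flag ≥ 0 ∧ PySem.List.pyGetD xs flag ' ' = '9' then
      pvLoopA size (PySem.List.pySetD (PySem.List.pySetD xs flag '0') ((size : Int) - flag - 1) '0')
        (flag - 1) fuel
    else xs

def zerar_palindrome (palindrome : String) : String :=
  let xs := palindrome.toList
  let size_list := xs.length
  -- int((n-1)/2): equals Nat truncation (n-1)/2 for every n, including n = 0 (both give 0)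
  let flag : Nat := (size_list - 1) / 2
  String.ofList (pvLoopA size_list xs (flag : Int) (flag + 1))

-- ===== PORT B =====
-- hand port of str.rstrip('9'): exact (removes exactly the trailing '9' characters)
def pvRstrip9 (cs : List Char) : List Char := (cs.reverse.dropWhile (fun ch => ch == '9')).reverse

def zerar_palindrome_alt (palindrome : String) : String :=
  let s := palindrome.toList
  let n : Int := (s.length : Int)
  let c : Int := PySem.Int.floordiv (n - 1) 2
  let h := PySem.List.slice s none (some (c + 1))
  let k : Int := (h.length : Int) - ((pvRstrip9 h).length : Int)
  if k = 0 then String.ofList s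
  else
    let z : Int := 2 * k - PySem.Int.mod n 2
    String.ofList (PySem.List.slice s none (some (c - k + 1)) ++ PySem.List.pyRepeat ['0'] z
      ++ PySem.List.slice s (some (c - k + 1 + z)) none)

-- ===== PRECONDITION & SPEC =====
-- Pre_ excludes only the empty string, on which A raises IndexError (palindrome[0] of []).
def Pre_zerar_palindrome (palindrome : String) : Prop := palindrome ≠ ""
instance (palindrome : String) : Decidable (Pre_zerar_palindrome palindrome) := by
  unfold Pre_zerar_palindrome; infer_instance
def pvWitness_zerar_palindrome : String := "9"

def Spec_zerar_palindrome (palindrome : String) (out : String) : Prop := out = zerar_palindrome_alt palindrome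
instance (palindrome : String) (out : String) : Decidable (Spec_zerar_palindrome palindrome out) := by unfold Spec_zerar_palindrome; infer_instance

-- ===== CLAIM (what is proved, stated in full; the proofs are below) =====
def Claim_equal_zerar_palindrome : Prop := ∀ (palindrome : String), Dom_zerar_palindrome palindrome → Pre_zerar_palindrome palindrome → Spec_zerar_palindrome palindrome (zerar_palindrome palindrome)

-- ===== LEMMAS AND PROOFS =====

-- length of the maximal '9'-run in xs ending at index f and running leftwards
def pvRunlen (xs : List Char) : Nat → Nat
  | 0 => if xs.getD 0 ' ' = '9' then 1 else 0
  | Nat.succ f => if xs.getD (f + 1) ' ' = '9' then pvRunlen xs f + 1 else 0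

-- the set of indices both programs turn into '0' (n = length, f = center, k = run length)
def pvZone (n f k i : Nat) : Bool :=
  (decide (f + 1 ≤ i + k) && decide (i ≤ f)) || (decide (n ≤ i + f + 1) && decide (i + f + 2 ≤ n + k))

theorem pvRunlen_le (xs : List Char) (f : Nat) : pvRunlen xs f ≤ f + 1 := by
  induction f with
  | zero => simp [pvRunlen]; split <;> omega
  | succ f ih => simp [pvRunlen]; split <;> omega

theorem pvRunlen_congr (xs ys : List Char) (f : Nat)
    (h : ∀ i, i ≤ f → xs.getD i ' ' = ys.getD i ' ') : pvRunlen xs f = pvRunlen ys f := by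
  induction f with
  | zero => unfold pvRunlen; rw [h 0 (le_refl _)]
  | succ f ih =>
    unfold pvRunlen
    rw [h (f + 1) (le_refl _), ih (fun i hi => h i (by omega))]

theorem set2_getD (xs : List Char) (a b j : Nat) (hj : j < xs.length) :
    (((xs.set a '0').set b '0').getD j ' ') = if j = a ∨ j = b then '0' else xs.getD j ' ' := by
  simp only [List.getD, List.getElem?_set, List.length_set]
  split_ifs <;> simp_all
  omega

theorem pvLoopA_len (size : Nat) (fuel : Nat) : ∀ (xs : List Char) (flag : Int),
    (pvLoopA size xs flag fuel).length = xs.length := by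
  induction fuel with
  | zero => intro xs flag; rfl
  | succ fuel ih =>
    intro xs flag
    simp only [pvLoopA]
    split
    · rw [ih]; simp [PySem.List.length_pySetD]
    · rfl

theorem pvLoopA_getD : ∀ (f : Nat) (xs : List Char), 2 * f < xs.length →
    ∀ i < xs.length, (pvLoopA xs.length xs (f : Int) (f + 1)).getD i ' '
      = if pvZone xs.length f (pvRunlen xs f) i then '0' else xs.getD i ' ' := by
  intro f
  induction f with
  | zero =>
    intro xs hn i hi
    have step : pvLoopA xs.length xs ((0 : Nat) : Int) 1
        = if ((0 : Nat) : Int) ≥ 0 ∧ PySem.List.pyGetD xs ((0 : Nat) : Int) ' ' = '9' then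
            pvLoopA xs.length
              (PySem.List.pySetD (PySem.List.pySetD xs ((0 : Nat) : Int) '0')
                ((xs.length : Int) - ((0 : Nat) : Int) - 1) '0') (((0 : Nat) : Int) - 1) 0
          else xs := rfl
    rw [step, PySem.List.pyGetD_natCast]
    by_cases h9 : xs.getD 0 ' ' = '9'
    · rw [if_pos ⟨by exact_mod_cast Int.natCast_nonneg 0, h9⟩]
      have hcast : ((xs.length : Int) - ((0 : Nat) : Int) - 1) = ((xs.length - 1 : Nat) : Int) := by
        push_cast; omega
      rw [hcast, PySem.List.pySetD_natCast, PySem.List.pySetD_natCast]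
      have fin : pvLoopA xs.length ((xs.set 0 '0').set (xs.length - 1) '0') (((0:Nat):Int) - 1) 0
          = (xs.set 0 '0').set (xs.length - 1) '0' := rfl
      rw [fin, set2_getD xs 0 (xs.length - 1) i hi]
      have hr : pvRunlen xs 0 = 1 := by unfold pvRunlen; rw [if_pos h9]
      rw [hr]
      simp only [pvZone, Bool.or_eq_true, Bool.and_eq_true, decide_eq_true_eq]
      split_ifs <;> first | rfl | omega
    · rw [if_neg (fun hcon => h9 hcon.2)]
      have hr : pvRunlen xs 0 = 0 := by unfold pvRunlen; rw [if_neg h9]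
      rw [hr]
      simp only [pvZone, Bool.or_eq_true, Bool.and_eq_true, decide_eq_true_eq]
      rw [if_neg (by omega)]
  | succ f ih =>
    intro xs hn i hi
    have step : pvLoopA xs.length xs (((f + 1 : Nat)) : Int) (f + 1 + 1)
        = if (((f + 1 : Nat)) : Int) ≥ 0 ∧ PySem.List.pyGetD xs (((f + 1 : Nat)) : Int) ' ' = '9' then
            pvLoopA xs.length
              (PySem.List.pySetD (PySem.List.pySetD xs (((f + 1 : Nat)) : Int) '0')
                ((xs.length : Int) - (((f + 1 : Nat)) : Int) - 1) '0') ((((f + 1 : Nat)) : Int) - 1) (f + 1)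
          else xs := rfl
    rw [step, PySem.List.pyGetD_natCast]
    by_cases h9 : xs.getD (f + 1) ' ' = '9'
    · rw [if_pos ⟨Int.natCast_nonneg _, h9⟩]
      have hcast : ((xs.length : Int) - (((f + 1 : Nat)) : Int) - 1) = ((xs.length - f - 2 : Nat) : Int) := by
        push_cast; omega
      have hflag : (((f + 1 : Nat)) : Int) - 1 = ((f : Nat) : Int) := by push_cast; ring
      rw [hcast, PySem.List.pySetD_natCast, PySem.List.pySetD_natCast, hflag]
      set xs2 := (xs.set (f + 1) '0').set (xs.length - f - 2) '0' with hxs2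
      have hlen2 : xs2.length = xs.length := by simp [hxs2]
      have key := ih xs2 (by omega) i (by omega)
      rw [hlen2] at key
      rw [key]
      have hget2 : ∀ j, j < xs.length →
          xs2.getD j ' ' = if j = f + 1 ∨ j = xs.length - f - 2 then '0' else xs.getD j ' ' :=
        fun j hj => set2_getD xs (f + 1) (xs.length - f - 2) j hj
      have hK : pvRunlen xs2 f = pvRunlen xs f := by
        apply pvRunlen_congr
        intro j hj
        rw [hget2 j (by omega), if_neg (by omega)]
      have hr : pvRunlen xs (f + 1) = pvRunlen xs f + 1 := by
        conv_lhs => rw [pvRunlen]; rw [if_pos h9]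
      rw [hK, hr, hget2 i hi]
      have hKle := pvRunlen_le xs f
      simp only [pvZone, Bool.or_eq_true, Bool.and_eq_true, decide_eq_true_eq]
      split_ifs <;> first | rfl | omega
    · rw [if_neg (fun hcon => h9 hcon.2)]
      have hr : pvRunlen xs (f + 1) = 0 := by conv_lhs => rw [pvRunlen]; rw [if_neg h9]
      rw [hr]
      simp only [pvZone, Bool.or_eq_true, Bool.and_eq_true, decide_eq_true_eq]
      rw [if_neg (by omega)]

theorem tw_rev_take (xs : List Char) : ∀ c, c < xs.length →
    ((xs.take (c+1)).reverse.takeWhile (fun ch => ch == '9')).length = pvRunlen xs c := by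
  intro c
  induction c with
  | zero =>
    intro h
    rw [List.take_add_one]
    simp [pvRunlen, List.getD, List.getElem?_eq_getElem h]
    split <;> simp_all
  | succ c ih =>
    intro h
    rw [List.take_add_one, List.getElem?_eq_getElem h]
    simp only [List.reverse_append, Option.toList_some, List.reverse_cons, List.reverse_nil,
      List.nil_append, List.cons_append, List.takeWhile_cons]
    simp only [pvRunlen, List.getD, List.getElem?_eq_getElem h]
    split <;> simp_all
    exact ih (by omega)

theorem pvRstrip9_k (xs : List Char) (c : Nat) (hc : c < xs.length) :
    (xs.take (c + 1)).length - (pvRstrip9 (xs.take (c + 1))).length = pvRunlen xs c := by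
  have hsum := congrArg List.length
    (List.takeWhile_append_dropWhile (p := fun ch => ch == '9') (l := (xs.take (c+1)).reverse))
  rw [List.length_append, List.length_reverse] at hsum
  have h1 : (pvRstrip9 (xs.take (c+1))).length
      = (List.dropWhile (fun ch => ch == '9') (xs.take (c+1)).reverse).length := by
    simp [pvRstrip9]
  rw [h1, ← tw_rev_take xs c hc]
  omega

theorem alt_getD (xs : List Char) (c k z : Nat)
    (hn : 1 ≤ xs.length) (hc' : c = (xs.length - 1) / 2) (hk : 1 ≤ k) (hk' : k ≤ c + 1)
    (hz : z = 2 * k - xs.length % 2) :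
    ∀ i < xs.length,
      (xs.take (c + 1 - k) ++ List.replicate z '0' ++ xs.drop (c + 1 - k + z)).getD i ' '
        = if pvZone xs.length c k i then '0' else xs.getD i ' ' := by
  intro i hi
  have h2c : 2 * c < xs.length := by omega
  have htl : (xs.take (c + 1 - k)).length = c + 1 - k := by
    rw [List.length_take]; omega
  simp only [pvZone, Bool.or_eq_true, Bool.and_eq_true, decide_eq_true_eq]
  by_cases h1 : i < c + 1 - k
  · rw [if_neg (by omega)]
    simp only [List.getD]
    rw [List.getElem?_append_left (by simp [htl]; omega),
        List.getElem?_append_left (by omega : i < (xs.take (c + 1 - k)).length),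
        List.getElem?_take_of_lt h1]
  · by_cases h2 : i < c + 1 - k + z
    · rw [if_pos (by omega)]
      simp only [List.getD]
      rw [List.getElem?_append_left (by simp [htl]; omega),
          List.getElem?_append_right (by omega : (xs.take (c + 1 - k)).length ≤ i)]
      rw [htl, List.getElem?_replicate]
      rw [if_pos (by omega)]
      rfl
    · rw [if_neg (by omega)]
      simp only [List.getD]
      rw [List.getElem?_append_right (by simp [htl]; omega)]
      simp only [List.length_append, htl, List.length_replicate, List.getElem?_drop]
      rw [show c + 1 - k + z + (i - (c + 1 - k + z)) = i by omega]

theorem list_eq_of_getD (l1 l2 : List Char) (hlen : l1.length = l2.length)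
    (h : ∀ i < l1.length, l1.getD i ' ' = l2.getD i ' ') : l1 = l2 := by
  apply List.ext_getElem hlen
  intro i h1 h2
  have := h i h1
  rwa [List.getD_eq_getElem _ _ h1, List.getD_eq_getElem _ _ h2] at this

-- ===== VERDICT (by name: the statement is the Claim_ definition above) =====
theorem zerar_palindrome_spec : Claim_equal_zerar_palindrome := by
  intro p _ hpre
  unfold Spec_zerar_palindrome
  have hne : p.toList ≠ [] := fun hc => hpre (String.toList_eq_nil_iff.mp hc)
  simp only [zerar_palindrome, zerar_palindrome_alt]
  set xs := p.toList with hxs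
  have hn : 1 ≤ xs.length := by
    have := List.length_pos_of_ne_nil hne
    omega
  set n := xs.length with hnn
  set c : Nat := (n - 1) / 2 with hcc
  have h2c : 2 * c < n := by omega
  -- evaluate B's let-bound values
  have hcint : PySem.Int.floordiv ((n : Int) - 1) 2 = ((c : Nat) : Int) := by
    rw [show ((n : Int) - 1) = ((n - 1 : Nat) : Int) by omega]
    exact_mod_cast PySem.Int.floordiv_natCast (n - 1) 2
  have hslice : PySem.List.slice xs none (some (((c : Nat) : Int) + 1)) = xs.take (c + 1) := by
    rw [show (((c : Nat) : Int) + 1) = (((c + 1 : Nat)) : Int) by push_cast; ring]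
    exact PySem.List.slice_to_natCast xs (c + 1)
  have htlen : (xs.take (c + 1)).length = c + 1 := by rw [List.length_take]; omega
  set K : Nat := pvRunlen xs c with hKK
  have hKle : K ≤ c + 1 := pvRunlen_le xs c
  have hstriple := pvRstrip9_k xs c (by omega)
  have hrs_le : (pvRstrip9 (xs.take (c + 1))).length ≤ c + 1 := by
    have := List.length_dropWhile_le (fun ch => ch == '9') (xs.take (c+1)).reverse
    simp only [pvRstrip9, List.length_reverse] at this ⊢
    omega
  rw [htlen, ← hKK] at hstriple
  have hkint : ((xs.take (c + 1)).length : Int) - ((pvRstrip9 (xs.take (c + 1))).length : Int)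
      = ((K : Nat) : Int) := by
    rw [htlen]; omega
  rw [hcint, hslice, hkint]
  by_cases hK0 : K = 0
  · rw [if_pos (by exact_mod_cast congrArg (fun m : Nat => (m : Int)) hK0)]
    congr 1
    apply list_eq_of_getD _ _ (pvLoopA_len n (c + 1) xs ((c : Nat) : Int))
    intro i hi
    rw [pvLoopA_len n (c + 1) xs ((c : Nat) : Int)] at hi
    rw [pvLoopA_getD c xs h2c i hi, ← hKK, hK0]
    simp only [pvZone, Bool.or_eq_true, Bool.and_eq_true, decide_eq_true_eq]
    rw [if_neg (by omega)]
  · rw [if_neg (by exact_mod_cast hK0)]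
    set z : Nat := 2 * K - n % 2 with hzz
    have hmod : PySem.Int.mod (n : Int) 2 = ((n % 2 : Nat) : Int) := by
      exact_mod_cast PySem.Int.mod_natCast n 2
    have hzint : 2 * ((K : Nat) : Int) - PySem.Int.mod (n : Int) 2 = ((z : Nat) : Int) := by
      rw [hmod]; omega
    have hs1 : PySem.List.slice xs none (some (((c : Nat) : Int) - ((K : Nat) : Int) + 1))
        = xs.take (c + 1 - K) := by
      rw [show (((c : Nat) : Int) - ((K : Nat) : Int) + 1) = (((c + 1 - K : Nat)) : Int) by omega]
      exact PySem.List.slice_to_natCast xs (c + 1 - K)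
    have hrep : PySem.List.pyRepeat ['0'] (2 * ((K : Nat) : Int) - PySem.Int.mod (n : Int) 2)
        = List.replicate z '0' := by
      rw [hzint, PySem.List.pyRepeat_singleton, Int.toNat_natCast]
    have hs2 : PySem.List.slice xs (some (((c : Nat) : Int) - ((K : Nat) : Int) + 1
          + (2 * ((K : Nat) : Int) - PySem.Int.mod (n : Int) 2))) none
        = xs.drop (c + 1 - K + z) := by
      rw [hzint, show (((c : Nat) : Int) - ((K : Nat) : Int) + 1 + ((z : Nat) : Int))
        = (((c + 1 - K + z : Nat)) : Int) by omega]
      exact PySem.List.slice_from_natCast xs (c + 1 - K + z)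
    rw [hs1, hrep, hs2]
    congr 1
    have hlenB : (xs.take (c + 1 - K) ++ List.replicate z '0' ++ xs.drop (c + 1 - K + z)).length
        = n := by
      simp only [List.length_append, List.length_take, List.length_replicate, List.length_drop]
      omega
    apply list_eq_of_getD
    · rw [pvLoopA_len n (c + 1) xs ((c : Nat) : Int), hlenB]
    · intro i hi
      rw [pvLoopA_len n (c + 1) xs ((c : Nat) : Int)] at hi
      rw [pvLoopA_getD c xs h2c i hi, ← hKK,
        alt_getD xs c K z hn hcc (by omega) hKle hzz i hi]
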